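-- pv_equiv track=rewrite | github.com/Nacho-Cola/coding-test | 프로그래머스/3/12987. 숫자 게임/숫자 게임.py | solution
-- ===== SOURCE A (Python) =====
-- from heapq import heapify, heappop, heappush
--
-- def solution(A, B):
--     answer = 0
--     heapA = [-i for i in A]
--     heapB = [-i for i in B]
--     heapify(heapA)
--     heapify(heapB)
--     for i in range(len(A)):
--         a,b = heappop(heapA),heappop(heapB)
--         if a > b :
--             answer += 1
--         else:
--             heappush(heapB, b)
--     return answer
-- ===== SOURCE B (Python) =====
-- def solution(A, B):
--     sa = sorted(A)
--     sb = sorted(B)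
--     i = 0
--     for b in sb:
--         if i < len(sa) and b > sa[i]:
--             i += 1
--     return i
-- ===== Notes on version B (the rewrite author's own statement) =====
-- stated objective: simpler
-- what changed: Replaces the two max-heaps with repeated heappop/heappush by sorting both lists once and doing a single two-pointer sweep that advances a cursor into sorted A whenever the next sorted B value beats it.
-- crash fix: When len(A) > len(B) and every B value can beat a distinct A value even after discarding A's minimum, A exhausts heapB and raises IndexError; B returns the matching count len(B) there. — e.g. on solution([1, 2], [5]): A raises IndexError, B returns 1
import Mathlib
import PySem

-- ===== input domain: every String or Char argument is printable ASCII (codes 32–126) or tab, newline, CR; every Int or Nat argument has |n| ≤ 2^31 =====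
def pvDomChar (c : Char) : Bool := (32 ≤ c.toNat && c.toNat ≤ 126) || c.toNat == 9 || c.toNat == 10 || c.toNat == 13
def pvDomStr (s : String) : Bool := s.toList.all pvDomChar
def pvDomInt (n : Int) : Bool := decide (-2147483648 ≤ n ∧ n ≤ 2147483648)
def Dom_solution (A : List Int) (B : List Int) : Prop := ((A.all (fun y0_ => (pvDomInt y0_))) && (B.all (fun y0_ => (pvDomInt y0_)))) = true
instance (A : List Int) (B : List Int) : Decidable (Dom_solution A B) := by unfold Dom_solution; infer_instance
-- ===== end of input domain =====

-- B replaces A's two max-heaps with repeated heappop/heappush by one sort of each list and a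
-- single two-pointer sweep; objective: simpler.

-- ===== PORT A =====
-- A uses heapq only through heapify/heappop/heappush on lists of Int. The heap is ported by its
-- semantics: the list as a bag of values, heappop returning the minimal value and the bag without
-- one occurrence of it (heapify = identity on contents, heappush = append). This is exact for
-- every value A's code observes: the value heappop returns is the minimum of the bag either way,
-- and `none` is exactly where Python's heappop raises IndexError (empty heap).
def heappopSem (l : List Int) : Option (Int × List Int) :=
  match PySem.List.min? l (fun x => x) with
  | none => none
  | some m => some (m, (PySem.List.remove? l m).getD l)

-- the `for i in range(len(A))` loop of A, state = (answer, heapA, heapB); none = IndexError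
def solLoopA : Nat → Int → List Int → List Int → Option Int
  | 0, ans, _, _ => some ans
  | n + 1, ans, hA, hB =>
    match heappopSem hA, heappopSem hB with
    | some (a, hA'), some (b, hB') =>
      if a > b then solLoopA n (ans + 1) hA' hB'
      else solLoopA n ans hA' (hB' ++ [b])
    | _, _ => none

def solution (A : List Int) (B : List Int) : Int :=
  (solLoopA A.length 0 (A.map (fun i => -i)) (B.map (fun i => -i))).getD 0

-- ===== PORT B =====
def solution_alt (A : List Int) (B : List Int) : Int :=
  let sa := PySem.List.sorted A (fun x => x) false
  let sb := PySem.List.sorted B (fun x => x) false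
  sb.foldl (fun i b => if i < (sa.length : Int) ∧ PySem.List.pyGetD sa i 0 < b then i + 1 else i) 0

-- ===== PRECONDITION & SPEC =====
-- Pre_ excludes exactly the inputs on which A raises IndexError (heapB runs empty): those with
-- len(A) > len(B) where every B value beats a distinct A value even after discarding A's minimum,
-- i.e. sorted(B)[j] > sorted(A)[j+1] for every j < len(B). Pre_ is the closed-form complement.
def Pre_solution (A : List Int) (B : List Int) : Prop :=
  A.length ≤ B.length ∨
  ∃ j < B.length, j + 1 < A.length ∧
    (PySem.List.sorted B (fun x => x) false).getD j 0 ≤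
      (PySem.List.sorted A (fun x => x) false).getD (j + 1) 0

instance (A : List Int) (B : List Int) : Decidable (Pre_solution A B) := by
  unfold Pre_solution; infer_instance

def pvWitness_solution : List Int × List Int := ([3, 1, 2], [1, 3, 2])

-- When len(A) > len(B) and every B value can beat a distinct A value even after discarding A's
-- minimum, A pops from the exhausted heapB and raises IndexError; B returns the count len(B) there.
def Raises_solution (A : List Int) (B : List Int) : Prop :=
  B.length < A.length ∧
  ∀ j < B.length,
    (PySem.List.sorted A (fun x => x) false).getD (j + 1) 0 <
      (PySem.List.sorted B (fun x => x) false).getD j 0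

instance (A : List Int) (B : List Int) : Decidable (Raises_solution A B) := by
  unfold Raises_solution; infer_instance

def pvRaiseWitness_solution : List Int × List Int := ([1, 2], [5])
def pvRaiseWitnessOut_solution : Int := 1

def Spec_solution (A : List Int) (B : List Int) (out : Int) : Prop := out = solution_alt A B
instance (A : List Int) (B : List Int) (out : Int) : Decidable (Spec_solution A B out) := by
  unfold Spec_solution; infer_instance

-- ===== CLAIM (what is proved, stated in full; the proofs are below) =====
def Claim_equal_solution : Prop :=
  ∀ (A : List Int) (B : List Int), Dom_solution A B → Pre_solution A B →
    Spec_solution A B (solution A B)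

def Claim_raises_solution : Prop :=
  (∀ (A : List Int) (B : List Int), Dom_solution A B → Raises_solution A B → ¬ Pre_solution A B) ∧
  (Dom_solution (pvRaiseWitness_solution.1) (pvRaiseWitness_solution.2) ∧
   Raises_solution (pvRaiseWitness_solution.1) (pvRaiseWitness_solution.2) ∧
   solution_alt (pvRaiseWitness_solution.1) (pvRaiseWitness_solution.2) = pvRaiseWitnessOut_solution)

-- ===== LEMMAS AND PROOFS =====

-- A's loop on the abstract state: both heaps replaced by ascending-sorted lists of the
-- negated values; pop = take the head.  none = the IndexError case.
def gg : List Int → List Int → Option Int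
  | [], _ => some 0
  | _ :: _, [] => none
  | a :: la, b :: lb => if a > b then (gg la lb).map (· + 1) else gg la (b :: lb)

-- B's two-pointer sweep, recursively: both lists sorted ascending (original values).
def tp : List Int → List Int → Int
  | _, [] => 0
  | [], _ :: _ => 0
  | a :: sa, b :: sb => if a < b then 1 + tp sa sb else tp (a :: sa) sb

theorem foldl_min_eq_self (a : Int) (l : List Int) (h : ∀ y ∈ l, a ≤ y) :
    l.foldl min a = a := by
  induction l with
  | nil => rfl
  | cons x t ih =>
    simp only [List.foldl_cons]
    rw [min_eq_left (h x (by simp))]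
    exact ih (fun y hy => h y (by simp [hy]))

theorem heappopSem_nil : heappopSem [] = none := by
  simp [heappopSem, PySem.List.min?]

theorem heappopSem_cons_of_min (a : Int) (l : List Int) (h : ∀ y ∈ l, a ≤ y) :
    heappopSem (a :: l) = some (a, l) := by
  unfold heappopSem
  rw [PySem.List.min?_id_cons, foldl_min_eq_self a l h]
  simp [PySem.List.remove?_cons_self]

theorem heappopSem_eq_some_iff (l : List Int) (m : Int) (r : List Int) :
    heappopSem l = some (m, r) ↔
      (m ∈ l ∧ (∀ y ∈ l, m ≤ y) ∧ r = l.erase m) := by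
  unfold heappopSem
  constructor
  · intro h
    cases hm : PySem.List.min? l (fun x => x) with
    | none => rw [hm] at h; simp at h
    | some m' =>
      rw [hm] at h
      simp only [Option.some.injEq, Prod.mk.injEq] at h
      obtain ⟨rfl, rfl⟩ := h
      have hmem := PySem.List.min?_mem hm
      have hmin := PySem.List.min?_isMin hm
      refine ⟨hmem, hmin, ?_⟩
      rw [PySem.List.remove?_eq_some_erase l _ hmem]
      rfl
  · rintro ⟨hmem, hmin, rfl⟩
    cases hm : PySem.List.min? l (fun x => x) with
    | none => rw [PySem.List.min?_eq_none_iff] at hm; subst hm; simp at hmem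
    | some m' =>
      have hmem' := PySem.List.min?_mem hm
      have hmin' := PySem.List.min?_isMin hm
      have : m' = m := le_antisymm (hmin' m hmem) (hmin m' hmem')
      subst this
      simp [PySem.List.remove?_eq_some_erase l _ hmem]

theorem heappopSem_perm {l l₂ : List Int} (p : l.Perm l₂) (m : Int) (r : List Int)
    (h : heappopSem l = some (m, r)) :
    ∃ r₂, heappopSem l₂ = some (m, r₂) ∧ r.Perm r₂ := by
  rw [heappopSem_eq_some_iff] at h
  obtain ⟨hmem, hmin, rfl⟩ := h
  refine ⟨l₂.erase m, ?_, p.erase m⟩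
  rw [heappopSem_eq_some_iff]
  exact ⟨p.mem_iff.mp hmem, fun y hy => hmin y (p.mem_iff.mpr hy), rfl⟩

theorem heappopSem_eq_none_iff (l : List Int) : heappopSem l = none ↔ l = [] := by
  constructor
  · intro h
    cases l with
    | nil => rfl
    | cons a t =>
      exfalso
      cases hm : heappopSem (a :: t) with
      | none =>
        unfold heappopSem at hm
        cases hmm : PySem.List.min? (a :: t) (fun x => x) with
        | none => rw [PySem.List.min?_eq_none_iff] at hmm; simp at hmm
        | some m => rw [hmm] at hm; simp at hm
      | some r => rw [hm] at h; simp at h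
  · rintro rfl; exact heappopSem_nil

-- A's loop only looks at the two heaps through heappop: its value is permutation-invariant.
theorem solLoopA_perm (n : Nat) : ∀ (ans : Int) {hA hA₂ hB hB₂ : List Int},
    hA.Perm hA₂ → hB.Perm hB₂ →
    solLoopA n ans hA hB = solLoopA n ans hA₂ hB₂ := by
  induction n with
  | zero => intros; rfl
  | succ n ih =>
    intro ans hA hA₂ hB hB₂ pa pb
    unfold solLoopA
    cases ha : heappopSem hA with
    | none =>
      rw [heappopSem_eq_none_iff] at ha; subst ha
      have h2 : hA₂ = [] := pa.symm.eq_nil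
      subst h2
      rw [heappopSem_nil]
    | some r =>
      obtain ⟨a, hA'⟩ := r
      obtain ⟨hA₂', ha₂, pa'⟩ := heappopSem_perm pa a hA' ha
      rw [ha₂]
      cases hb : heappopSem hB with
      | none =>
        rw [heappopSem_eq_none_iff] at hb; subst hb
        have h2 : hB₂ = [] := pb.symm.eq_nil
        subst h2
        rw [heappopSem_nil]
      | some rb =>
        obtain ⟨b, hB'⟩ := rb
        obtain ⟨hB₂', hb₂, pb'⟩ := heappopSem_perm pb b hB' hb
        rw [hb₂]
        by_cases hab : a > b
        · simp only [hab, if_pos]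
          exact ih (ans + 1) pa' pb'
        · simp only [hab, if_false]
          exact ih ans pa' (pb'.append (List.Perm.refl [b]))

-- on sorted heaps A's loop IS gg
theorem solLoopA_sorted (la : List Int) (hla : la.Pairwise (· ≤ ·)) :
    ∀ (lb : List Int), lb.Pairwise (· ≤ ·) → ∀ (ans : Int),
      solLoopA la.length ans la lb = (gg la lb).map (ans + ·) := by
  induction la with
  | nil => intro lb _ ans; simp [solLoopA, gg]
  | cons a la ih =>
    intro lb hlb ans
    rw [List.pairwise_cons] at hla
    obtain ⟨hamin, hla'⟩ := hla
    show solLoopA (la.length + 1) ans (a :: la) lb = _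
    unfold solLoopA
    rw [heappopSem_cons_of_min a la hamin]
    cases lb with
    | nil => rw [heappopSem_nil]; rfl
    | cons b lb' =>
      rw [List.pairwise_cons] at hlb
      obtain ⟨hbmin, hlb'⟩ := hlb
      rw [heappopSem_cons_of_min b lb' hbmin]
      by_cases hab : a > b
      · simp only [hab, if_pos]
        rw [ih hla' lb' hlb' (ans + 1)]
        show _ = ((if a > b then (gg la lb').map (· + 1) else gg la (b :: lb')).map (ans + ·))
        simp only [hab, if_pos, Option.map_map]
        apply congrFun
        apply congrArg
        funext c
        simp [Function.comp]
        ring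
      · simp only [hab, if_false]
        rw [solLoopA_perm la.length ans (List.Perm.refl la)
          ((List.perm_append_singleton b lb').trans (List.Perm.refl (b :: lb')))]
        rw [ih hla' (b :: lb') (List.pairwise_cons.mpr ⟨hbmin, hlb'⟩) ans]
        show _ = ((if a > b then (gg la lb').map (· + 1) else gg la (b :: lb')).map (ans + ·))
        simp only [hab, if_false]

theorem tp_nil_left : ∀ sb, tp [] sb = 0 := by
  intro sb; cases sb <;> rfl

theorem tp_nil_right : ∀ sa, tp sa [] = 0 := by
  intro sa; cases sa <;> rfl

theorem tp_cons (a : Int) (sa : List Int) (b : Int) (sb : List Int) :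
    tp (a :: sa) (b :: sb) = if a < b then 1 + tp sa sb else tp (a :: sa) sb := rfl

-- dropping A's maximum changes nothing when no b beats it
theorem tp_drop_max (x : Int) : ∀ (sb : List Int), (∀ b ∈ sb, b ≤ x) →
    ∀ sa : List Int, tp (sa ++ [x]) sb = tp sa sb := by
  intro sb
  induction sb with
  | nil => intro _ sa; rfl
  | cons b sb ih =>
    intro hb sa
    have hbx : b ≤ x := hb b (by simp)
    have hb' : ∀ y ∈ sb, y ≤ x := fun y hy => hb y (by simp [hy])
    cases sa with
    | nil =>
      show tp [x] (b :: sb) = tp [] (b :: sb)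
      unfold tp
      rw [if_neg (by omega)]
      simpa [tp_nil_left] using ih hb' []
    | cons a sa =>
      show tp (a :: (sa ++ [x])) (b :: sb) = tp (a :: sa) (b :: sb)
      unfold tp
      by_cases hab : a < b
      · rw [if_pos hab, if_pos hab, ih hb' sa]
      · rw [if_neg hab, if_neg hab]
        exact ih hb' (a :: sa)

-- when B's maximum beats A's maximum, they pair up: one match plus the rest
theorem tp_match_max (x y : Int) (hxy : x < y) : ∀ (sb : List Int), (∀ b ∈ sb, b ≤ y) →
    ∀ sa : List Int, (∀ a ∈ sa, a ≤ x) → tp (sa ++ [x]) (sb ++ [y]) = 1 + tp sa sb := by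
  intro sb
  induction sb with
  | nil =>
    intro _ sa ha
    cases sa with
    | nil =>
      show tp [x] [y] = 1 + tp [] []
      unfold tp
      rw [if_pos hxy]; rfl
    | cons a sa =>
      show tp (a :: (sa ++ [x])) [y] = 1 + tp (a :: sa) []
      unfold tp
      rw [if_pos (by have := ha a (by simp); omega), tp_nil_right]
  | cons b sb ih =>
    intro hb sa ha
    have hby : b ≤ y := hb b (by simp)
    have hb' : ∀ z ∈ sb, z ≤ y := fun z hz => hb z (by simp [hz])
    cases sa with
    | nil =>
      show tp [x] (b :: (sb ++ [y])) = 1 + tp [] (b :: sb)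
      unfold tp
      by_cases hxb : x < b
      · rw [if_pos hxb]; simp [tp_nil_left]
      · rw [if_neg hxb]
        simpa [tp_nil_left] using ih hb' [] (by simp)
    | cons a sa =>
      show tp (a :: (sa ++ [x])) (b :: (sb ++ [y])) = 1 + tp (a :: sa) (b :: sb)
      have ha' : ∀ z ∈ sa, z ≤ x := fun z hz => ha z (by simp [hz])
      unfold tp
      by_cases hab : a < b
      · rw [if_pos hab, if_pos hab, ih hb' sa ha']
      · rw [if_neg hab, if_neg hab]
        exact ih hb' (a :: sa) ha

theorem rev_map_neg_concat (sa : List Int) (x : Int) :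
    ((sa ++ [x]).map (fun i => -i)).reverse = -x :: (sa.map (fun i => -i)).reverse := by
  simp

theorem pairwise_concat_le {sa : List Int} {x : Int}
    (h : (sa ++ [x]).Pairwise (· ≤ ·)) : sa.Pairwise (· ≤ ·) ∧ ∀ a ∈ sa, a ≤ x := by
  rw [List.pairwise_append] at h
  exact ⟨h.1, fun a ha => h.2.2 a ha x (by simp)⟩

-- the descending-maxima game (gg on negated reversed lists) counts exactly what tp counts
theorem gg_eq_tp (sa : List Int) (hsa : sa.Pairwise (· ≤ ·)) :
    ∀ (sb : List Int), sb.Pairwise (· ≤ ·) → ∀ c : Int,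
      gg ((sa.map (fun i => -i)).reverse) ((sb.map (fun i => -i)).reverse) = some c →
      tp sa sb = c := by
  induction sa using List.reverseRecOn with
  | nil =>
    intro sb _ c h
    simp only [List.map_nil, List.reverse_nil] at h
    rw [show gg [] ((sb.map (fun i => -i)).reverse) = some 0 from rfl] at h
    rw [tp_nil_left]
    simp only [Option.some.injEq] at h
    omega
  | append_singleton sa x ih =>
    intro sb hsb c h
    obtain ⟨hsa', hax⟩ := pairwise_concat_le hsa
    rw [rev_map_neg_concat] at h
    cases hsb' : sb.reverse with
    | nil =>
      have : sb = [] := by simpa using congrArg List.reverse hsb'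
      subst this
      simp only [List.map_nil, List.reverse_nil] at h
      rw [show gg (-x :: (sa.map (fun i => -i)).reverse) [] = none from rfl] at h
      simp at h
    | cons y t =>
      have hsbeq : sb = t.reverse ++ [y] := by
        have := congrArg List.reverse hsb'
        simpa using this
      subst hsbeq
      obtain ⟨hsb', hby⟩ := pairwise_concat_le hsb
      rw [rev_map_neg_concat] at h
      rw [show gg (-x :: (sa.map (fun i => -i)).reverse) (-y :: (t.reverse.map (fun i => -i)).reverse)
        = if -x > -y then (gg ((sa.map (fun i => -i)).reverse) ((t.reverse.map (fun i => -i)).reverse)).map (· + 1)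
          else gg ((sa.map (fun i => -i)).reverse) (-y :: (t.reverse.map (fun i => -i)).reverse) from rfl] at h
      by_cases hxy : x < y
      · rw [if_pos (by omega)] at h
        cases hg : gg ((sa.map (fun i => -i)).reverse) ((t.reverse.map (fun i => -i)).reverse) with
        | none => rw [hg] at h; simp at h
        | some c' =>
          rw [hg] at h
          simp only [Option.map_some, Option.some.injEq] at h
          have htp := ih hsa' t.reverse hsb' c' hg
          rw [tp_match_max x y hxy t.reverse hby sa hax, htp]
          omega
      · rw [if_neg (by omega)] at h
        rw [← rev_map_neg_concat] at h
        have htp := ih hsa' (t.reverse ++ [y]) hsb c h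
        rw [tp_drop_max x (t.reverse ++ [y]) (by
          intro b hb
          rcases (List.mem_append.mp hb) with h1 | h1
          · exact le_trans (hby b h1) (by omega)
          · simp at h1; omega) sa]
        exact htp

theorem getD_concat_lt (l : List Int) (x : Int) (k : Nat) (hk : k < l.length) :
    (l ++ [x]).getD k 0 = l.getD k 0 := by
  rw [List.getD_eq_getElem?_getD, List.getD_eq_getElem?_getD, List.getElem?_append_left hk]

theorem getD_concat_last (l : List Int) (x : Int) :
    (l ++ [x]).getD l.length 0 = x := by
  rw [List.getD_eq_getElem?_getD]
  simp

theorem getD_le_last {l : List Int} {x : Int} (h : (l ++ [x]).Pairwise (· ≤ ·))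
    (k : Nat) (hk : k < l.length + 1) : (l ++ [x]).getD k 0 ≤ x := by
  obtain ⟨_, hax⟩ := pairwise_concat_le h
  have hk' : k < (l ++ [x]).length := by simp; omega
  rw [List.getD_eq_getElem _ _ hk']
  have hmem := List.getElem_mem hk'
  rcases List.mem_append.mp hmem with h1 | h1
  · exact hax _ h1
  · simp at h1; omega

-- under Pre_'s closed-form condition the descending game never exhausts B
theorem gg_isSome (sa : List Int) (hsa : sa.Pairwise (· ≤ ·)) :
    ∀ (sb : List Int), sb.Pairwise (· ≤ ·) →
      (sa.length ≤ sb.length ∨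
        ∃ j < sb.length, j + 1 < sa.length ∧ sb.getD j 0 ≤ sa.getD (j + 1) 0) →
      (gg ((sa.map (fun i => -i)).reverse) ((sb.map (fun i => -i)).reverse)).isSome := by
  induction sa using List.reverseRecOn with
  | nil => intro sb _ _; rfl
  | append_singleton sa x ih =>
    intro sb hsb hpre
    obtain ⟨hsa', hax⟩ := pairwise_concat_le hsa
    rw [rev_map_neg_concat]
    cases hsb' : sb.reverse with
    | nil =>
      exfalso
      have hnil : sb = [] := by simpa using congrArg List.reverse hsb'
      subst hnil
      rcases hpre with h | ⟨j, hj, _⟩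
      · simp at h
      · simp at hj
    | cons y t =>
      have hsbeq : sb = t.reverse ++ [y] := by simpa using congrArg List.reverse hsb'
      subst hsbeq
      obtain ⟨hsb'', hby⟩ := pairwise_concat_le hsb
      rw [rev_map_neg_concat]
      rw [show gg (-x :: (sa.map (fun i => -i)).reverse) (-y :: (t.reverse.map (fun i => -i)).reverse)
        = if -x > -y then (gg ((sa.map (fun i => -i)).reverse) ((t.reverse.map (fun i => -i)).reverse)).map (· + 1)
          else gg ((sa.map (fun i => -i)).reverse) (-y :: (t.reverse.map (fun i => -i)).reverse) from rfl]
      by_cases hxy : x < y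
      · rw [if_pos (by omega), Option.isSome_map]
        apply ih hsa' t.reverse hsb''
        rcases hpre with h | ⟨j, hj, hj1, hle⟩
        · left; simp at h ⊢; omega
        · simp only [List.length_append, List.length_reverse, List.length_cons,
            List.length_nil] at hj hj1
          have hjlt : j < t.reverse.length := by
            by_contra hge
            have hj' : j = t.reverse.length := by
              simp only [List.length_reverse] at hge ⊢; omega
            rw [hj', getD_concat_last] at hle
            have h2 : (sa ++ [x]).getD (t.reverse.length + 1) 0 ≤ x :=
              getD_le_last hsa _ (by simp only [List.length_reverse] at hj' ⊢; omega)
            omega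
          by_cases hj1' : j + 1 < sa.length
          · right
            refine ⟨j, hjlt, hj1', ?_⟩
            rw [← getD_concat_lt t.reverse y j hjlt, ← getD_concat_lt sa x (j+1) hj1']
            exact hle
          · left
            simp at hj1
            omega
      · rw [if_neg (by omega), ← rev_map_neg_concat]
        apply ih hsa' (t.reverse ++ [y]) hsb
        rcases hpre with h | ⟨j, hj, hj1, hle⟩
        · left; simp at h ⊢; omega
        · simp only [List.length_append, List.length_cons] at hj1
          by_cases hj1' : j + 1 < sa.length
          · right
            refine ⟨j, hj, hj1', ?_⟩
            rw [← getD_concat_lt sa x (j+1) hj1']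
            exact hle
          · left
            simp only [List.length_append, List.length_reverse, List.length_cons,
              List.length_nil] at hj hj1 hj1' ⊢
            omega

-- B's fold with its integer cursor IS tp on the not-yet-passed suffix of sorted A
theorem foldl_tp (sa : List Int) :
    ∀ (sb : List Int) (i : Nat), i ≤ sa.length →
      sb.foldl (fun i b => if i < (sa.length : Int) ∧ PySem.List.pyGetD sa i 0 < b then i + 1 else i)
        (i : Int) = (i : Int) + tp (sa.drop i) sb := by
  intro sb
  induction sb with
  | nil => intro i _; rw [List.foldl_nil, tp_nil_right]; ring
  | cons b sb ih =>
    intro i hi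
    rw [List.foldl_cons]
    by_cases h : i < sa.length
    · have hget : PySem.List.pyGetD sa (i : Int) 0 = sa[i] := by
        rw [PySem.List.pyGetD_natCast]
        exact List.getD_eq_getElem sa 0 h
      have hdrop : sa.drop i = sa[i] :: sa.drop (i + 1) := (List.getElem_cons_drop h).symm
      by_cases hlt : sa[i] < b
      · rw [if_pos ⟨by exact_mod_cast h, by rw [hget]; exact hlt⟩]
        have h2 := ih (i + 1) (by omega)
        push_cast at h2
        rw [h2, hdrop, tp_cons, if_pos hlt]
        ring
      · rw [if_neg (by rw [hget]; tauto), ih i hi, hdrop, tp_cons, if_neg hlt, ← hdrop]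
    · rw [if_neg (by intro hc; exact h (by exact_mod_cast hc.1)), ih i hi,
        List.drop_eq_nil_of_le (le_of_not_gt h), tp_nil_left, tp_nil_left]

theorem rev_map_neg_pairwise {l : List Int} (h : l.Pairwise (· ≤ ·)) :
    ((l.map (fun i => -i)).reverse).Pairwise (· ≤ ·) := by
  rw [List.pairwise_reverse, List.pairwise_map]
  exact h.imp (by intro a b hab; omega)

-- ===== VERDICT (by name: the statement is the Claim_ definition above) =====
theorem solution_spec : Claim_equal_solution := by
  intro A B _ hpre
  unfold Spec_solution solution solution_alt
  set sa := PySem.List.sorted A (fun x => x) false with hsa_def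
  set sb := PySem.List.sorted B (fun x => x) false with hsb_def
  have hsa : sa.Pairwise (· ≤ ·) := PySem.List.sorted_pairwise A (fun x => x)
  have hsb : sb.Pairwise (· ≤ ·) := PySem.List.sorted_pairwise B (fun x => x)
  have hlenA : sa.length = A.length := PySem.List.length_sorted A (fun x => x) false
  have hlenB : sb.length = B.length := PySem.List.length_sorted B (fun x => x) false
  have hpermA : (A.map (fun i => -i)).Perm ((sa.map (fun i => -i)).reverse) :=
    ((PySem.List.sorted_perm A (fun x => x) false).map _).symm.trans
      (List.reverse_perm _).symm
  have hpermB : (B.map (fun i => -i)).Perm ((sb.map (fun i => -i)).reverse) :=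
    ((PySem.List.sorted_perm B (fun x => x) false).map _).symm.trans
      (List.reverse_perm _).symm
  have hlen : A.length = ((sa.map (fun i => -i)).reverse).length := by simp [hlenA]
  rw [solLoopA_perm A.length 0 hpermA hpermB, hlen,
    solLoopA_sorted _ (rev_map_neg_pairwise hsa) _ (rev_map_neg_pairwise hsb) 0]
  have hpre' : sa.length ≤ sb.length ∨
      ∃ j < sb.length, j + 1 < sa.length ∧ sb.getD j 0 ≤ sa.getD (j + 1) 0 := by
    rcases hpre with h | ⟨j, hj, hj1, hle⟩
    · left; omega
    · right; exact ⟨j, by omega, by omega, hle⟩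
  have hsome := gg_isSome sa hsa sb hsb hpre'
  cases hg : gg ((sa.map (fun i => -i)).reverse) ((sb.map (fun i => -i)).reverse) with
  | none => rw [hg] at hsome; simp at hsome
  | some c =>
    have htp := gg_eq_tp sa hsa sb hsb c hg
    have hfold := foldl_tp sa sb 0 (by omega)
    simp only [Nat.cast_zero, List.drop_zero, zero_add] at hfold
    show (Option.map (fun x => 0 + x) (some c)).getD 0 =
      sb.foldl (fun i b => if i < (sa.length : Int) ∧ PySem.List.pyGetD sa i 0 < b then i + 1 else i) 0
    rw [hfold, htp]
    simp

def solution_raises : Claim_raises_solution := by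
  unfold Claim_raises_solution
  exact ⟨by
    intro A B _ hr hpre
    obtain ⟨hlen, hall⟩ := hr
    rcases hpre with h | ⟨j, hj, hj1, hle⟩
    · omega
    · exact absurd hle (not_le.mpr (hall j hj)), by decide⟩
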